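-- pv_equiv track=rewrite | github.com/jschalk/pale | src/ch00_py/keyword_class_builder.py | get_cumlative_ch_keywords_dict
-- ===== SOURCE A (Python) =====
-- from copy import copy as copy_copy
--
-- def get_cumlative_ch_keywords_dict(keywords_by_chapter: dict[int, set[str]]) -> dict:
--     allowed_keywords_set = set()
--     cumlative_ch_keywords_dict = {}
--     for chapter_num in sorted(list(keywords_by_chapter.keys())):
--         ch_keywords_set = keywords_by_chapter.get(chapter_num)
--         allowed_keywords_set.update(ch_keywords_set)
--         cumlative_ch_keywords_dict[chapter_num] = copy_copy(allowed_keywords_set)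
--     return cumlative_ch_keywords_dict
-- ===== SOURCE B (Python) =====
-- def get_cumlative_ch_keywords_dict(keywords_by_chapter: dict[int, set[str]]) -> dict:
--     keys = sorted(keywords_by_chapter.keys())
--     return {
--         ch: set().union(*(keywords_by_chapter[c] for c in keys if c <= ch))
--         for ch in keys
--     }
-- ===== Notes on version B (the rewrite author's own statement) =====
-- stated objective: alternative
-- what changed: Replaced the single accumulating pass that copies a growing set at each step by a dict comprehension that rebuilds each cumulative value independently as the union of the keyword sets of all chapters with key <= the current one.
import Mathlib
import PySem

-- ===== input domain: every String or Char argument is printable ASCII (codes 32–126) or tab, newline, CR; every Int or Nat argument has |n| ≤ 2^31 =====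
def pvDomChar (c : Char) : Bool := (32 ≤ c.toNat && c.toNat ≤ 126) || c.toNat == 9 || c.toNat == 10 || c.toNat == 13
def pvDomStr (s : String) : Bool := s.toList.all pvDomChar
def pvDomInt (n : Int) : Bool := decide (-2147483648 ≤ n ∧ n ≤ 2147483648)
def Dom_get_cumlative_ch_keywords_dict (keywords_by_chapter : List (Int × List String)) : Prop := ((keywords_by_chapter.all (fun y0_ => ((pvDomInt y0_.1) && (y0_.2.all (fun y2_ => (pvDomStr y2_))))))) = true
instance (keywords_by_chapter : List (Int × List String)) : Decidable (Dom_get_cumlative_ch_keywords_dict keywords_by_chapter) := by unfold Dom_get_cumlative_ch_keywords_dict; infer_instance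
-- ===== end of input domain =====

-- B rebuilds each cumulative value by re-unioning the whole key prefix instead of
-- snapshotting one growing accumulator (alternative decomposition, not faster).

-- ===== PORT A =====
-- dict lookup on the association list (first match), as Python's keywords_by_chapter.get(k) / [k]
def pvLookup (kbc : List (Int × List String)) (k : Int) : List String :=
  ((kbc.find? (fun p => p.1 == k)).map (·.2)).getD []

def get_cumlative_ch_keywords_dict (keywords_by_chapter : List (Int × List String)) : List (Int × List String) :=
  let keys := PySem.List.sorted (PySem.Set.ofList (keywords_by_chapter.map (·.1))) (fun x => x) false
  (keys.foldl (fun (st : PySem.Set String × List (Int × List String)) chapter_num =>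
      let ch_keywords_set := pvLookup keywords_by_chapter chapter_num
      let allowed := PySem.Set.update st.1 ch_keywords_set
      (allowed, st.2 ++ [(chapter_num, allowed)]))
    (PySem.Set.empty, [])).2

-- ===== PORT B =====
def get_cumlative_ch_keywords_dict_alt (keywords_by_chapter : List (Int × List String)) : List (Int × List String) :=
  let keys := PySem.List.sorted (PySem.Set.ofList (keywords_by_chapter.map (·.1))) (fun x => x) false
  keys.map (fun ch =>
    (ch, (keys.filter (fun c => decide (c ≤ ch))).foldl
           (fun s c => PySem.Set.update s (pvLookup keywords_by_chapter c)) PySem.Set.empty))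

-- ===== PRECONDITION & SPEC =====
def Spec_get_cumlative_ch_keywords_dict (keywords_by_chapter : List (Int × List String)) (out : List (Int × List String)) : Prop := out = get_cumlative_ch_keywords_dict_alt keywords_by_chapter
instance (keywords_by_chapter : List (Int × List String)) (out : List (Int × List String)) : Decidable (Spec_get_cumlative_ch_keywords_dict keywords_by_chapter out) := by unfold Spec_get_cumlative_ch_keywords_dict; infer_instance

-- ===== CLAIM (what is proved, stated in full; the proofs are below) =====
def Claim_equal_get_cumlative_ch_keywords_dict : Prop := ∀ (keywords_by_chapter : List (Int × List String)), Dom_get_cumlative_ch_keywords_dict keywords_by_chapter → Spec_get_cumlative_ch_keywords_dict keywords_by_chapter (get_cumlative_ch_keywords_dict keywords_by_chapter)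

-- ===== LEMMAS AND PROOFS =====

-- On a strictly increasing key list, A's accumulating fold produces, at each key,
-- exactly the union-of-prefix value B recomputes by filtering.
theorem pv_main (lk : Int → List String) (keys : List Int)
    (h : keys.Pairwise (· < ·)) (acc : PySem.Set String) (out : List (Int × List String)) :
    (keys.foldl (fun (st : PySem.Set String × List (Int × List String)) k =>
        let a := PySem.Set.update st.1 (lk k)
        (a, st.2 ++ [(k, a)])) (acc, out)).2
    = out ++ keys.map (fun ch =>
        (ch, (keys.filter (fun c => decide (c ≤ ch))).foldl
               (fun s c => PySem.Set.update s (lk c)) acc)) := by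
  induction keys generalizing acc out with
  | nil => simp
  | cons k rest ih =>
    rcases List.pairwise_cons.mp h with ⟨hk, hrest⟩
    have hfk : rest.filter (fun c => decide (c ≤ k)) = [] := by
      apply List.filter_eq_nil_iff.mpr
      intro c hc
      simp [not_le.mpr (hk c hc)]
    have hstep : ∀ ch ∈ rest,
        (k :: rest).filter (fun c => decide (c ≤ ch)) = k :: rest.filter (fun c => decide (c ≤ ch)) := by
      intro ch hch
      simp [le_of_lt (hk ch hch)]
    simp only [List.foldl_cons]
    rw [ih hrest, List.append_assoc]
    congr 1
    have h1 : (k :: rest).filter (fun c => decide (c ≤ k)) = [k] := by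
      rw [List.filter_cons_of_pos (by simp), hfk]
    simp only [List.map_cons, h1, List.foldl_cons, List.foldl_nil, List.singleton_append]
    congr 1
    apply List.map_congr_left
    intro ch hch
    rw [hstep ch hch]
    simp

-- ===== VERDICT (by name: the statement is the Claim_ definition above) =====
theorem get_cumlative_ch_keywords_dict_spec : Claim_equal_get_cumlative_ch_keywords_dict := by
  intro kbc _
  unfold Spec_get_cumlative_ch_keywords_dict get_cumlative_ch_keywords_dict get_cumlative_ch_keywords_dict_alt
  have h := PySem.List.sorted_ofList_pairwise_lt (xs := kbc.map (·.1))
  exact pv_main (pvLookup kbc) _ h PySem.Set.empty []
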